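-- pv_equiv track=rewrite | github.com/sourabhdharpure/gitlab-chatbot | components/tech_doc_viewer.py | _process_markdown_content
-- ===== SOURCE A (Python) =====
-- def _process_markdown_content(content: str) -> str:
--     """Process markdown content for better display."""
--     # Convert code blocks to proper format
--     content = content.replace('```python', '<div class="code-block"><pre><code class="language-python">')
--     content = content.replace('```json', '<div class="code-block"><pre><code class="language-json">')
--     content = content.replace('```yaml', '<div class="code-block"><pre><code class="language-yaml">')
--     content = content.replace('```bash', '<div class="code-block"><pre><code class="language-bash">')
--     content = content.replace('```', '</code></pre></div>')
--
--     # Convert inline code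
--     content = content.replace('`', '<code>')
--
--     # Convert bold text
--     content = content.replace('**', '<strong>')
--     content = content.replace('**', '</strong>')
--
--     # Convert italic text
--     content = content.replace('*', '<em>')
--     content = content.replace('*', '</em>')
--
--     # Convert lists
--     lines = content.split('\n')
--     processed_lines = []
--     in_list = False
--
--     for line in lines:
--         if line.strip().startswith('- '):
--             if not in_list:
--                 processed_lines.append('<ul>')
--                 in_list = True
--             processed_lines.append(f'<li>{line.strip()[2:]}</li>')
--         elif line.strip().startswith('* '):
--             if not in_list:
--                 processed_lines.append('<ul>')
--                 in_list = True
--             processed_lines.append(f'<li>{line.strip()[2:]}</li>')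
--         else:
--             if in_list:
--                 processed_lines.append('</ul>')
--                 in_list = False
--             processed_lines.append(line)
--
--     if in_list:
--         processed_lines.append('</ul>')
--
--     return '\n'.join(processed_lines)
-- ===== SOURCE B (Python) =====
-- def _is_list_line(line):
--     s = line.strip()
--     return s.startswith('- ') or s.startswith('* ')
--
--
-- def _process_markdown_content(content: str) -> str:
--     """Process markdown content for better display."""
--     # The replace chain is the specified formatting and is kept verbatim.
--     content = content.replace('```python', '<div class="code-block"><pre><code class="language-python">')
--     content = content.replace('```json', '<div class="code-block"><pre><code class="language-json">')
--     content = content.replace('```yaml', '<div class="code-block"><pre><code class="language-yaml">')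
--     content = content.replace('```bash', '<div class="code-block"><pre><code class="language-bash">')
--     content = content.replace('```', '</code></pre></div>')
--     content = content.replace('`', '<code>')
--     content = content.replace('**', '<strong>')
--     content = content.replace('**', '</strong>')
--     content = content.replace('*', '<em>')
--     content = content.replace('*', '</em>')
--
--     # List handling: instead of a stateful in_list flag, find each maximal
--     # run of list lines with two indices and wrap it in <ul>...</ul>.
--     lines = content.split('\n')
--     n = len(lines)
--     out = []
--     i = 0
--     while i < n:
--         if _is_list_line(lines[i]):
--             j = i
--             while j < n and _is_list_line(lines[j]):
--                 j += 1
--             out.append('<ul>')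
--             out.extend('<li>' + l.strip()[2:] + '</li>' for l in lines[i:j])
--             out.append('</ul>')
--             i = j
--         else:
--             out.append(lines[i])
--             i += 1
--     return '\n'.join(out)
-- ===== Notes on version B (the rewrite author's own statement) =====
-- stated objective: alternative
-- what changed: The fixed replace chain is kept (it is the specified formatting), but the list pass drops the in_list flag: B scans with two indices, finds each maximal run of list lines and wraps the whole run in <ul>...</ul> at once.
import Mathlib
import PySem

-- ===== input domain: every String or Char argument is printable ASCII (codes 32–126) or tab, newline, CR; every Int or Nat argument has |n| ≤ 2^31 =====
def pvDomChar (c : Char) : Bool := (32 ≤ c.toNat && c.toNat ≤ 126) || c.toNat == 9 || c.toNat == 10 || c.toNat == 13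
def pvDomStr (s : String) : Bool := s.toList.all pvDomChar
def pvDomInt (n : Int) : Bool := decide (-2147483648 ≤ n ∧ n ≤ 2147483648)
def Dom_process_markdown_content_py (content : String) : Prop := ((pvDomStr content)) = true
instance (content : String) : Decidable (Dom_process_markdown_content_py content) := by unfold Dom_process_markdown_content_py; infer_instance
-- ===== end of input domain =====

-- B keeps A's replace chain verbatim but replaces the in_list-flag loop by a
-- two-index scan that wraps each maximal run of list lines in <ul>…</ul> at once
-- (alternative decomposition, same cost; return-value equivalence proved below).

-- ===== PORT A =====

-- the fixed sequence of str.replace calls (shared text of both programs)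
def pvReplaces (content : String) : String :=
  let content := PySem.Str.replace content "```python" "<div class=\"code-block\"><pre><code class=\"language-python\">"
  let content := PySem.Str.replace content "```json" "<div class=\"code-block\"><pre><code class=\"language-json\">"
  let content := PySem.Str.replace content "```yaml" "<div class=\"code-block\"><pre><code class=\"language-yaml\">"
  let content := PySem.Str.replace content "```bash" "<div class=\"code-block\"><pre><code class=\"language-bash\">"
  let content := PySem.Str.replace content "```" "</code></pre></div>"
  let content := PySem.Str.replace content "`" "<code>"
  let content := PySem.Str.replace content "**" "<strong>"
  let content := PySem.Str.replace content "**" "</strong>"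
  let content := PySem.Str.replace content "*" "<em>"
  let content := PySem.Str.replace content "*" "</em>"
  content

def process_markdown_content_py (content : String) : String :=
  let content := pvReplaces content
  let lines : List String := (PySem.Chars.splitOn content.toList ['\n']).map String.ofList
  let st := lines.foldl (fun (st : List String × Bool) line =>
    let processed_lines := st.1
    let in_list := st.2
    if PySem.Str.startswith (PySem.Str.strip line) "- " then
      ((if ¬ in_list then processed_lines ++ ["<ul>"] else processed_lines)
        ++ ["<li>" ++ PySem.Str.slice (PySem.Str.strip line) (some 2) none ++ "</li>"], true)
    else if PySem.Str.startswith (PySem.Str.strip line) "* " then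
      ((if ¬ in_list then processed_lines ++ ["<ul>"] else processed_lines)
        ++ ["<li>" ++ PySem.Str.slice (PySem.Str.strip line) (some 2) none ++ "</li>"], true)
    else
      ((if in_list then processed_lines ++ ["</ul>"] else processed_lines) ++ [line], false))
    ([], false)
  PySem.Str.join "\n" (if st.2 then st.1 ++ ["</ul>"] else st.1)

-- ===== PORT B =====

def pvIsListLine (line : String) : Bool :=
  PySem.Str.startswith (PySem.Str.strip line) "- " || PySem.Str.startswith (PySem.Str.strip line) "* "

def pvLiItem (line : String) : String :=
  "<li>" ++ PySem.Str.slice (PySem.Str.strip line) (some 2) none ++ "</li>"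

-- the two-index while loop of Source B: each maximal run of list lines becomes one <ul> block
def pvGroups : List String → List String
  | [] => []
  | l :: ls =>
    if pvIsListLine l then
      ("<ul>" :: ((l :: ls).takeWhile pvIsListLine).map pvLiItem ++ ["</ul>"])
        ++ pvGroups ((l :: ls).dropWhile pvIsListLine)
    else
      l :: pvGroups ls
  termination_by ls => ls.length
  decreasing_by
    · simp only [List.dropWhile_cons, *, if_pos]
      exact Nat.lt_succ_of_le (List.length_dropWhile_le _ _)
    · simp

def process_markdown_content_py_alt (content : String) : String :=
  let content := pvReplaces content
  let lines : List String := (PySem.Chars.splitOn content.toList ['\n']).map String.ofList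
  PySem.Str.join "\n" (pvGroups lines)

-- ===== PRECONDITION & SPEC =====
def Spec_process_markdown_content_py (content : String) (out : String) : Prop := out = process_markdown_content_py_alt content
instance (content : String) (out : String) : Decidable (Spec_process_markdown_content_py content out) := by unfold Spec_process_markdown_content_py; infer_instance

-- ===== CLAIM (what is proved, stated in full; the proofs are below) =====
def Claim_equal_process_markdown_content_py : Prop := ∀ (content : String), Dom_process_markdown_content_py content → Spec_process_markdown_content_py content (process_markdown_content_py content)

-- ===== LEMMAS AND PROOFS =====

-- A's loop, written as a recursion producing the lines still to be emitted from flag `inl`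
def pvGoA : List String → Bool → List String
  | [], inl => if inl then ["</ul>"] else []
  | l :: ls, inl =>
    if pvIsListLine l then
      (if ¬ inl then ["<ul>"] else []) ++ [pvLiItem l] ++ pvGoA ls true
    else
      (if inl then ["</ul>"] else []) ++ [l] ++ pvGoA ls false

-- the foldl in port A accumulates exactly pvGoA
theorem pvFoldA_eq_go (ls : List String) (pl : List String) (inl : Bool) :
    (let st := ls.foldl (fun (st : List String × Bool) line =>
      let processed_lines := st.1
      let in_list := st.2
      if PySem.Str.startswith (PySem.Str.strip line) "- " then
        ((if ¬ in_list then processed_lines ++ ["<ul>"] else processed_lines) ++ [pvLiItem line], true)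
      else if PySem.Str.startswith (PySem.Str.strip line) "* " then
        ((if ¬ in_list then processed_lines ++ ["<ul>"] else processed_lines) ++ [pvLiItem line], true)
      else
        ((if in_list then processed_lines ++ ["</ul>"] else processed_lines) ++ [line], false))
      (pl, inl)
     (if st.2 then st.1 ++ ["</ul>"] else st.1)) = pl ++ pvGoA ls inl := by
  induction ls generalizing pl inl with
  | nil => cases inl <;> simp [pvGoA]
  | cons l ls ih =>
    by_cases h1 : PySem.Chars.startswith (PySem.Chars.strip l.toList) ['-', ' '] = true
    · cases inl
      · simpa [h1, pvGoA, pvIsListLine, List.append_assoc]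
          using ih (pl ++ ["<ul>", pvLiItem l]) true
      · simpa [h1, pvGoA, pvIsListLine, List.append_assoc]
          using ih (pl ++ [pvLiItem l]) true
    · by_cases h2 : PySem.Chars.startswith (PySem.Chars.strip l.toList) ['*', ' '] = true
      · cases inl
        · simpa [h1, h2, pvGoA, pvIsListLine, List.append_assoc]
            using ih (pl ++ ["<ul>", pvLiItem l]) true
        · simpa [h1, h2, pvGoA, pvIsListLine, List.append_assoc]
            using ih (pl ++ [pvLiItem l]) true
      · cases inl
        · simpa [h1, h2, pvGoA, pvIsListLine, List.append_assoc]
            using ih (pl ++ [l]) false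
        · simpa [h1, h2, pvGoA, pvIsListLine, List.append_assoc]
            using ih (pl ++ ["</ul>", l]) false

-- pvGoA with either flag equals the run-grouping of B
theorem pvGoA_eq_groups (ls : List String) :
    pvGoA ls false = pvGroups ls ∧
    pvGoA ls true = (ls.takeWhile pvIsListLine).map pvLiItem ++ ["</ul>"]
      ++ pvGroups (ls.dropWhile pvIsListLine) := by
  induction ls with
  | nil => simp [pvGoA, pvGroups]
  | cons l ls ih =>
    by_cases h : pvIsListLine l = true
    · constructor
      · simp [pvGoA, pvGroups, h, ih.2]
      · simp [pvGoA, h, ih.2, List.dropWhile_cons, List.append_assoc]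
    · constructor
      · simp [pvGoA, pvGroups, h, ih.1]
      · simp [pvGoA, pvGroups, h, ih.1]

-- ===== VERDICT (by name: the statement is the Claim_ definition above) =====
theorem process_markdown_content_py_spec : Claim_equal_process_markdown_content_py := by
  intro content _
  unfold Spec_process_markdown_content_py process_markdown_content_py process_markdown_content_py_alt
  have := pvFoldA_eq_go ((PySem.Chars.splitOn (pvReplaces content).toList ['\n']).map String.ofList) [] false
  simp only [pvLiItem] at this
  simp only [this, List.nil_append,
    (pvGoA_eq_groups ((PySem.Chars.splitOn (pvReplaces content).toList ['\n']).map String.ofList)).1]
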